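-- pv_equiv track=rewrite | github.com/Cvaslml/nand2tetris-Project | Project 2 Boolean Arithmetic.py | ALU
-- ===== SOURCE A (Python) =====
-- def nand(a, b):
--     return 0 if (a == 1 and b == 1) else 1
--
-- def xor_chip(a, b):
--     n1 = nand(a, b)
--     n2 = nand(a, n1)
--     n3 = nand(n1, b)
--     out = nand(n2, n3)
--     return out
--
-- def and_chip(a, b):
--     out = nand(nand(a, b), nand(a, b))
--     return out
--
-- def or_chip(a, b):
--     out = nand(nand(a, a), nand(b, b))
--     return out
--
-- def not_chip(a):
--     return nand(a, a)
--
-- def halfadder(a, b):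
--     suma = xor_chip(a, b)
--     acarreo = and_chip(a, b)
--     return {"Carry_H": acarreo, "Sum_H": suma}
--
-- def fulladder(a, b, c):
--     out1 = halfadder(a, b)
--     suma = halfadder(out1["Sum_H"], c)
--     acarreo = or_chip(out1["Carry_H"], suma["Carry_H"])
--     return {"Carry_F": acarreo, "Sum_F": suma["Sum_H"]}
--
-- def add16(a, b):
--     output = [0] * 16
--     acarreo = 0
--     for i in range(15, -1, -1):
--         resultado = fulladder(a[i], b[i], acarreo)
--         output[i] = resultado["Sum_F"]
--         acarreo = resultado["Carry_F"]
--     if acarreo == 1: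
--         output.insert(0, 1)
--     return output
--
-- def ALU(x, y, zx, nx, zy, ny, f, no):
--     if zx:
--         x = [0] * 16
--     if nx:
--         x = [not_chip(bit) for bit in x]
--     if zy:
--         y = [0] * 16
--     if ny:
--         y = [not_chip(bit) for bit in y]
--     if f:
--         out = add16(x, y)
--     else:
--         out = [and_chip(x[i], y[i]) for i in range(16)]
--     if no:
--         out = [not_chip(bit) for bit in out]
--     return out
-- ===== SOURCE B (Python) =====
-- def ALU(x, y, zx, nx, zy, ny, f, no):
--     xb = [0] * 16 if zx else [1 if b == 1 else 0 for b in x[:16]]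
--     if nx:
--         xb = [1 - b for b in xb]
--     yb = [0] * 16 if zy else [1 if b == 1 else 0 for b in y[:16]]
--     if ny:
--         yb = [1 - b for b in yb]
--     if f:
--         s = 0
--         for b in xb:
--             s = 2 * s + b
--         t = 0
--         for b in yb:
--             t = 2 * t + b
--         total = s + t
--         width = 17 if total >= 65536 else 16
--         out = []
--         for _ in range(width):
--             out.append(total % 2)
--             total //= 2
--         out.reverse()
--     else:
--         out = [a * b for a, b in zip(xb, yb)]
--     if no:
--         out = [1 - b for b in out]
--     return out
-- ===== Notes on version B (the rewrite author's own statement) =====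
-- stated objective: alternative
-- what changed: B replaces the gate-level NAND simulation (xor/and/or chips, dict-returning half/full adders and a 16-step ripple-carry loop) by arithmetic on normalized bits: it converts the operands to integers with a Horner fold, performs one integer addition (or a per-bit product for f=0) and renders the result back to a bit list, prepending the carry bit when the sum overflows 16 bits.
import Mathlib
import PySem

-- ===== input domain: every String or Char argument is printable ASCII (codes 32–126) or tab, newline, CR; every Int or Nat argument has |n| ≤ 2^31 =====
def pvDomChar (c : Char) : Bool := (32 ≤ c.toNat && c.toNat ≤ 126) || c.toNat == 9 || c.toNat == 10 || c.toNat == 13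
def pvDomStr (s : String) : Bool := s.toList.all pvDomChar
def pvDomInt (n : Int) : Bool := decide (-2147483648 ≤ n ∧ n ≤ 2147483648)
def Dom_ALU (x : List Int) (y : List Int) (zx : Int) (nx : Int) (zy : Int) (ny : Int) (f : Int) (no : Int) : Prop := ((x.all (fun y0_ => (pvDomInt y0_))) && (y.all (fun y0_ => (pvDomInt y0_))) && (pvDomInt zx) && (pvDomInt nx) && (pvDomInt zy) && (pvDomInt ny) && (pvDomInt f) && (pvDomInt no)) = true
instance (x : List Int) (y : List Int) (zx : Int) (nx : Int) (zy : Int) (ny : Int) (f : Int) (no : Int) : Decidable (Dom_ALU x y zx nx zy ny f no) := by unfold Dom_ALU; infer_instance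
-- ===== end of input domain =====

-- B replaces the gate-level NAND simulation (dicts, ripple-carry loop) by arithmetic on
-- normalized bits: the adder becomes one integer addition rendered back to bits.

-- ===== PORT A =====
def nand (a b : Int) : Int := if a = 1 ∧ b = 1 then 0 else 1

def xor_chip (a b : Int) : Int :=
  let n1 := nand a b
  let n2 := nand a n1
  let n3 := nand n1 b
  nand n2 n3

def and_chip (a b : Int) : Int := nand (nand a b) (nand a b)

def or_chip (a b : Int) : Int := nand (nand a a) (nand b b)

def not_chip (a : Int) : Int := nand a a

def halfadder (a b : Int) : PySem.Dict String Int :=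
  let suma := xor_chip a b
  let acarreo := and_chip a b
  (PySem.Dict.empty.insert "Carry_H" acarreo).insert "Sum_H" suma

-- d["k"] ported as (d.get? "k").getD 0: the keys are always present, so the default is never taken (exact)
def fulladder (a b c : Int) : PySem.Dict String Int :=
  let out1 := halfadder a b
  let suma := halfadder ((out1.get? "Sum_H").getD 0) c
  let acarreo := or_chip ((out1.get? "Carry_H").getD 0) ((suma.get? "Carry_H").getD 0)
  (PySem.Dict.empty.insert "Carry_F" acarreo).insert "Sum_F" ((suma.get? "Sum_H").getD 0)

-- a[i]/b[i] ported as pyGetD _ _ 0 and output[i] = v as pySetD: under Pre_ALU all indices are in range (exact)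
def add16 (a b : List Int) : List Int :=
  let st := (PySem.List.pyRange 15 (-1) (-1)).foldl
    (fun (st : List Int × Int) i =>
      let resultado := fulladder (PySem.List.pyGetD a i 0) (PySem.List.pyGetD b i 0) st.2
      (PySem.List.pySetD st.1 i ((resultado.get? "Sum_F").getD 0),
       (resultado.get? "Carry_F").getD 0))
    (List.replicate 16 0, 0)
  if st.2 = 1 then PySem.List.insert st.1 0 1 else st.1

def ALU (x : List Int) (y : List Int) (zx : Int) (nx : Int) (zy : Int) (ny : Int) (f : Int) (no : Int) : List Int :=
  let x := if zx ≠ 0 then List.replicate 16 0 else x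
  let x := if nx ≠ 0 then x.map not_chip else x
  let y := if zy ≠ 0 then List.replicate 16 0 else y
  let y := if ny ≠ 0 then y.map not_chip else y
  let out := if f ≠ 0 then add16 x y
             else (PySem.List.pyRange 0 16 1).map
               (fun i => and_chip (PySem.List.pyGetD x i 0) (PySem.List.pyGetD y i 0))
  if no ≠ 0 then out.map not_chip else out

-- ===== PORT B =====
def ALU_alt (x : List Int) (y : List Int) (zx : Int) (nx : Int) (zy : Int) (ny : Int) (f : Int) (no : Int) : List Int :=
  let xb := if zx ≠ 0 then List.replicate 16 (0 : Int)
            else (PySem.List.slice x none (some 16)).map (fun b => if b = 1 then (1 : Int) else 0)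
  let xb := if nx ≠ 0 then xb.map (fun b => 1 - b) else xb
  let yb := if zy ≠ 0 then List.replicate 16 (0 : Int)
            else (PySem.List.slice y none (some 16)).map (fun b => if b = 1 then (1 : Int) else 0)
  let yb := if ny ≠ 0 then yb.map (fun b => 1 - b) else yb
  let out :=
    if f ≠ 0 then
      let s := xb.foldl (fun s b => 2 * s + b) 0
      let t := yb.foldl (fun t b => 2 * t + b) 0
      let total := s + t
      let width : Nat := if total ≥ 65536 then 17 else 16
      -- the loop variable of 'for _ in range(width)' is unused, so range(width) is List.range width (exact)
      let st := (List.range width).foldl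
        (fun (st : List Int × Int) _ => (st.1 ++ [PySem.Int.mod st.2 2], PySem.Int.floordiv st.2 2))
        ([], total)
      st.1.reverse
    else (xb.zip yb).map (fun p => p.1 * p.2)
  if no ≠ 0 then out.map (fun b => 1 - b) else out

-- ===== PRECONDITION & SPEC =====
-- Pre_ALU excludes exactly the inputs where Python A raises IndexError: a 16-bit operand
-- shorter than 16 entries that is not zeroed away by its z-flag.
def Pre_ALU (x : List Int) (y : List Int) (zx : Int) (nx : Int) (zy : Int) (ny : Int) (f : Int) (no : Int) : Prop :=
  (zx ≠ 0 ∨ 16 ≤ x.length) ∧ (zy ≠ 0 ∨ 16 ≤ y.length)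
instance (x : List Int) (y : List Int) (zx : Int) (nx : Int) (zy : Int) (ny : Int) (f : Int) (no : Int) : Decidable (Pre_ALU x y zx nx zy ny f no) := by unfold Pre_ALU; infer_instance

def pvWitness_ALU : List Int × List Int × Int × Int × Int × Int × Int × Int :=
  ([0,1,1,0,0,1,0,1,1,0,1,0,0,1,1,1], [1,1,1,0,0,0,1,1,0,0,1,1,0,1,0,1], 0, 0, 0, 0, 1, 0)

def Spec_ALU (x : List Int) (y : List Int) (zx : Int) (nx : Int) (zy : Int) (ny : Int) (f : Int) (no : Int) (out : List Int) : Prop := out = ALU_alt x y zx nx zy ny f no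
instance (x : List Int) (y : List Int) (zx : Int) (nx : Int) (zy : Int) (ny : Int) (f : Int) (no : Int) (out : List Int) : Decidable (Spec_ALU x y zx nx zy ny f no out) := by unfold Spec_ALU; infer_instance

-- ===== CLAIM (what is proved, stated in full; the proofs are below) =====
def Claim_equal_ALU : Prop := ∀ (x : List Int) (y : List Int) (zx : Int) (nx : Int) (zy : Int) (ny : Int) (f : Int) (no : Int), Dom_ALU x y zx nx zy ny f no → Pre_ALU x y zx nx zy ny f no → Spec_ALU x y zx nx zy ny f no (ALU x y zx nx zy ny f no)

-- ===== LEMMAS AND PROOFS =====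

/-- Normalization of a raw "bit": 1 iff it equals 1 (what every gate tests). -/
def nb (b : Int) : Int := if b = 1 then 1 else 0

/-- Value of a bit list, least-significant bit FIRST. -/
def vL : List Int → Int
  | [] => 0
  | b :: r => b + 2 * vL r

/-- Low `n` bits of `m`, least-significant first. -/
def lsb : Nat → Int → List Int
  | 0, _ => []
  | n + 1, m => m % 2 :: lsb n (m / 2)

/-- Ripple-carry addition over normalized bit pairs, LSB first. -/
def ripple : List (Int × Int) → Int → List Int × Int
  | [], c => ([], c)
  | p :: r, c =>
    let t := p.1 + p.2 + c
    let s := ripple r (t / 2)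
    (t % 2 :: s.1, s.2)

/-- The pairs add16 feeds the full adders, normalized, LSB (index n-1) first. -/
def pr (a b : List Int) (n : Nat) : List (Int × Int) :=
  (((a.take n).map nb).zip ((b.take n).map nb)).reverse

def Bit01 (l : List Int) : Prop := ∀ v ∈ l, v = 0 ∨ v = 1

lemma nb01 (b : Int) : nb b = 0 ∨ nb b = 1 := by unfold nb; split <;> simp

lemma not_chip_eq (b : Int) : not_chip b = 1 - nb b := by
  unfold not_chip nand nb; split <;> split <;> omega

lemma and_chip_eq (p q : Int) : and_chip p q = nb p * nb q := by
  unfold and_chip nand nb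
  by_cases hp : p = 1 <;> by_cases hq : q = 1 <;> simp [hp, hq]

lemma fulladder_sum (a b c : Int) (hc : c = 0 ∨ c = 1) :
    ((fulladder a b c).get? "Sum_F").getD 0 = (nb a + nb b + c) % 2 := by
  rcases hc with rfl | rfl <;> by_cases ha : a = 1 <;> by_cases hb : b = 1 <;>
    simp [fulladder, halfadder, xor_chip, and_chip, or_chip, nand, nb, ha, hb]

lemma fulladder_carry (a b c : Int) (hc : c = 0 ∨ c = 1) :
    ((fulladder a b c).get? "Carry_F").getD 0 = (nb a + nb b + c) / 2 := by
  rcases hc with rfl | rfl <;> by_cases ha : a = 1 <;> by_cases hb : b = 1 <;>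
    simp [fulladder, halfadder, xor_chip, and_chip, or_chip, nand, nb, ha, hb] <;> decide

lemma vL_append (u : List Int) (a : Int) : vL (u ++ [a]) = vL u + a * 2 ^ u.length := by
  induction u with
  | nil => simp [vL]
  | cons h t ih => simp [vL, ih, pow_succ]; ring

lemma horner (l : List Int) (init : Int) :
    l.foldl (fun s b => 2 * s + b) init = init * 2 ^ l.length + vL l.reverse := by
  induction l generalizing init with
  | nil => simp [vL]
  | cons h t ih =>
    simp only [List.foldl_cons, List.reverse_cons, List.length_cons, ih, vL_append]
    rw [List.length_reverse]
    ring

lemma vL_nonneg (l : List Int) (h : Bit01 l) : 0 ≤ vL l := by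
  induction l with
  | nil => simp [vL]
  | cons b r ih =>
    have hb := h b (by simp)
    have hr := ih (fun v hv => h v (by simp [hv]))
    unfold vL; omega

lemma vL_lt (l : List Int) (h : Bit01 l) : vL l < 2 ^ l.length := by
  induction l with
  | nil => simp [vL]
  | cons b r ih =>
    have hb := h b (by simp)
    have hr := ih (fun v hv => h v (by simp [hv]))
    simp only [vL, List.length_cons, pow_succ]
    omega

lemma ediv_ediv (m : Int) (n : Nat) : m / 2 / 2 ^ n = m / 2 ^ (n + 1) := by
  rw [Int.ediv_ediv_of_nonneg (by norm_num : (0:Int) ≤ 2), pow_succ]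
  ring_nf

lemma lsb_succ (n : Nat) (m : Int) :
    lsb (n + 1) m = lsb n m ++ [m / 2 ^ n % 2] := by
  induction n generalizing m with
  | zero => simp [lsb]
  | succ k ih =>
    calc lsb (k + 2) m = m % 2 :: lsb (k + 1) (m / 2) := rfl
    _ = m % 2 :: (lsb k (m / 2) ++ [m / 2 / 2 ^ k % 2]) := by rw [ih]
    _ = lsb (k + 1) m ++ [m / 2 ^ (k + 1) % 2] := by rw [ediv_ediv m k]; rfl

lemma ripple_spec (l : List (Int × Int)) (c : Int) (hc : c = 0 ∨ c = 1)
    (h1 : Bit01 (l.map Prod.fst)) (h2 : Bit01 (l.map Prod.snd)) :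
    ripple l c = (lsb l.length (vL (l.map Prod.fst) + vL (l.map Prod.snd) + c),
      (vL (l.map Prod.fst) + vL (l.map Prod.snd) + c) / 2 ^ l.length) := by
  induction l generalizing c with
  | nil => simp [ripple, vL, lsb]
  | cons p r ih =>
    have hp1 := h1 p.1 (by simp)
    have hp2 := h2 p.2 (by simp)
    have hr1 : Bit01 (r.map Prod.fst) := fun v hv => h1 v (by simp at hv ⊢; tauto)
    have hr2 : Bit01 (r.map Prod.snd) := fun v hv => h2 v (by simp at hv ⊢; tauto)
    have ht : p.1 + p.2 + c = 0 ∨ p.1 + p.2 + c = 1 ∨ p.1 + p.2 + c = 2 ∨ p.1 + p.2 + c = 3 := by omega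
    have hc' : (p.1 + p.2 + c) / 2 = 0 ∨ (p.1 + p.2 + c) / 2 = 1 := by omega
    set T : Int := vL (r.map Prod.fst) + vL (r.map Prod.snd) + (p.1 + p.2 + c) / 2 with hT
    have hTot : vL ((p :: r).map Prod.fst) + vL ((p :: r).map Prod.snd) + c
        = 2 * T + (p.1 + p.2 + c) % 2 := by
      simp only [List.map_cons, vL, hT]; omega
    simp only [ripple, ih ((p.1 + p.2 + c) / 2) hc' hr1 hr2]
    refine Prod.ext ?_ ?_
    · show (p.1 + p.2 + c) % 2 :: lsb r.length T = lsb (p :: r).length (vL _ + vL _ + c)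
      rw [hTot]
      have : (2 * T + (p.1 + p.2 + c) % 2) % 2 = (p.1 + p.2 + c) % 2 := by omega
      have hdiv : (2 * T + (p.1 + p.2 + c) % 2) / 2 = T := by omega
      simp only [List.length_cons, lsb, this, hdiv]
    · show T / 2 ^ r.length = (vL _ + vL _ + c) / 2 ^ (p :: r).length
      rw [hTot, List.length_cons, ← ediv_ediv]
      have hdiv : (2 * T + (p.1 + p.2 + c) % 2) / 2 = T := by omega
      rw [hdiv]

lemma extract_loop (w : Nat) (acc : List Int) (t : Int) :
    (List.range w).foldl
      (fun (st : List Int × Int) _ => (st.1 ++ [PySem.Int.mod st.2 2], PySem.Int.floordiv st.2 2))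
      (acc, t) = (acc ++ lsb w t, t / 2 ^ w) := by
  induction w with
  | zero => simp [lsb]
  | succ k ih =>
    rw [List.range_succ, List.foldl_append, ih]
    simp only [List.foldl_cons, List.foldl_nil]
    rw [PySem.Int.mod_eq_emod_of_pos (by norm_num : (0:Int) < 2),
      PySem.Int.floordiv_eq_ediv_of_pos (by norm_num : (0:Int) < 2),
      lsb_succ, List.append_assoc, Int.ediv_ediv_of_nonneg (by positivity : (0:Int) ≤ 2 ^ k), ← pow_succ]

lemma pr_succ (a b : List Int) (n : Nat) (ha : n < a.length) (hb : n < b.length) :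
    pr a b (n + 1) = (nb a[n], nb b[n]) :: pr a b n := by
  unfold pr
  rw [List.take_succ, List.take_succ]
  have hga : a[n]? = some a[n] := List.getElem?_eq_getElem ha
  have hgb : b[n]? = some b[n] := List.getElem?_eq_getElem hb
  simp only [hga, hgb, Option.toList_some, List.map_append, List.map_cons, List.map_nil]
  rw [List.zip_append (by simp; omega)]
  simp

lemma addloop (a b : List Int) (n : Nat) (o : List Int) (c : Int)
    (hn : n ≤ o.length) (ha : n ≤ a.length) (hb : n ≤ b.length) (hc : c = 0 ∨ c = 1) :
    (PySem.List.pyRange ((n : Int) - 1) (-1) (-1)).foldl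
      (fun (st : List Int × Int) i =>
        (PySem.List.pySetD st.1 i
          (((fulladder (PySem.List.pyGetD a i 0) (PySem.List.pyGetD b i 0) st.2).get? "Sum_F").getD 0),
         ((fulladder (PySem.List.pyGetD a i 0) (PySem.List.pyGetD b i 0) st.2).get? "Carry_F").getD 0))
      (o, c)
    = ((ripple (pr a b n) c).1.reverse ++ o.drop n, (ripple (pr a b n) c).2) := by
  induction n generalizing o c with
  | zero =>
    rw [show ((0:Nat):Int) - 1 = -1 by norm_num, PySem.List.pyRange_neg_one_eq_nil (by norm_num)]
    simp [pr, ripple]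
  | succ n ih =>
    have ha' : n < a.length := by omega
    have hb' : n < b.length := by omega
    have ho' : n < o.length := by omega
    have hna := nb01 a[n]
    have hnb := nb01 b[n]
    have hga : PySem.List.pyGetD a ((n:Nat):Int) 0 = a[n] := by
      simp [List.getD_eq_getElem?_getD, List.getElem?_eq_getElem ha']
    have hgb : PySem.List.pyGetD b ((n:Nat):Int) 0 = b[n] := by
      simp [List.getD_eq_getElem?_getD, List.getElem?_eq_getElem hb']
    have hcast : ((n+1:Nat):Int) - 1 = (n:Int) := by push_cast; ring
    rw [hcast, PySem.List.pyRange_neg_one_cons (by omega), List.foldl_cons]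
    simp only [hga, hgb, fulladder_sum _ _ _ hc, fulladder_carry _ _ _ hc,
      PySem.List.pySetD_natCast]
    have hc1 : (nb a[n] + nb b[n] + c) / 2 = 0 ∨ (nb a[n] + nb b[n] + c) / 2 = 1 := by omega
    have hcast2 : ((n+1:Nat):Int) - 1 - 1 = (n:Int) - 1 := by push_cast; ring
    rw [ih (o.set n ((nb a[n] + nb b[n] + c) % 2)) ((nb a[n] + nb b[n] + c) / 2)
      (by simp; omega) (by omega) (by omega) hc1]
    rw [pr_succ a b n ha' hb']
    simp only [ripple]
    refine Prod.ext ?_ rfl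
    show (ripple (pr a b n) ((nb a[n] + nb b[n] + c) / 2)).1.reverse ++
        (o.set n ((nb a[n] + nb b[n] + c) % 2)).drop n = _
    have hdropset : (o.set n ((nb a[n] + nb b[n] + c) % 2)).drop n
        = (nb a[n] + nb b[n] + c) % 2 :: o.drop (n + 1) := by
      rw [List.drop_eq_getElem_cons (by simpa using ho')]
      congr 1
      · simp
      · rw [List.drop_set]
        simp
    rw [hdropset]
    simp

lemma bit01_map_nb (l : List Int) : Bit01 (l.map nb) := by
  intro v hv
  obtain ⟨b, -, rfl⟩ := List.mem_map.1 hv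
  exact nb01 b

lemma bit01_reverse (l : List Int) (h : Bit01 l) : Bit01 l.reverse :=
  fun v hv => h v (List.mem_reverse.1 hv)

lemma bit01_lsb (n : Nat) (m : Int) : Bit01 (lsb n m) := by
  induction n generalizing m with
  | zero => intro v hv; simp [lsb] at hv
  | succ k ih =>
    intro v hv
    simp only [lsb, List.mem_cons] at hv
    rcases hv with rfl | hv
    · omega
    · exact ih (m / 2) v hv

lemma map_not_chip_eq (l : List Int) (h : Bit01 l) :
    l.map not_chip = l.map (fun b => 1 - b) :=
  List.map_congr_left fun b hb => by rcases h b hb with rfl | rfl <;> simp [not_chip_eq, nb]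

lemma nb_fun_eq : (fun b : Int => if b = 1 then (1 : Int) else 0) = nb := rfl

lemma len_map_nb_take (XA : List Int) (hx : 16 ≤ XA.length) :
    ((XA.take 16).map nb).length = 16 := by simp; omega

lemma pr_map_fst (a b : List Int) (ha : 16 ≤ a.length) (hb : 16 ≤ b.length) :
    (pr a b 16).map Prod.fst = ((a.take 16).map nb).reverse := by
  unfold pr
  rw [List.map_reverse, List.map_fst_zip (by simp; omega)]

lemma pr_map_snd (a b : List Int) (ha : 16 ≤ a.length) (hb : 16 ≤ b.length) :
    (pr a b 16).map Prod.snd = ((b.take 16).map nb).reverse := by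
  unfold pr
  rw [List.map_reverse, List.map_snd_zip (by simp; omega)]

lemma add_branch (XA YA : List Int) (hx : 16 ≤ XA.length) (hy : 16 ≤ YA.length) :
    add16 XA YA =
      ((List.range (if ((XA.take 16).map nb).foldl (fun s b => 2 * s + b) 0 +
            ((YA.take 16).map nb).foldl (fun t b => 2 * t + b) 0 ≥ 65536 then 17 else 16)).foldl
        (fun (st : List Int × Int) _ => (st.1 ++ [PySem.Int.mod st.2 2], PySem.Int.floordiv st.2 2))
        ([], ((XA.take 16).map nb).foldl (fun s b => 2 * s + b) 0 +
            ((YA.take 16).map nb).foldl (fun t b => 2 * t + b) 0)).1.reverse := by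
  have hxl := len_map_nb_take XA hx
  have hyl := len_map_nb_take YA hy
  have hs : ((XA.take 16).map nb).foldl (fun s b => 2 * s + b) 0
      = vL ((XA.take 16).map nb).reverse := by rw [horner]; simp
  have ht : ((YA.take 16).map nb).foldl (fun t b => 2 * t + b) 0
      = vL ((YA.take 16).map nb).reverse := by rw [horner]; simp
  set T : Int := vL ((XA.take 16).map nb).reverse + vL ((YA.take 16).map nb).reverse with hT
  have hxb : Bit01 ((XA.take 16).map nb).reverse := bit01_reverse _ (bit01_map_nb _)
  have hyb : Bit01 ((YA.take 16).map nb).reverse := bit01_reverse _ (bit01_map_nb _)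
  have hx0 := vL_nonneg _ hxb
  have hy0 := vL_nonneg _ hyb
  have hxlt := vL_lt _ hxb
  have hylt := vL_lt _ hyb
  rw [List.length_reverse, hxl] at hxlt
  rw [List.length_reverse, hyl] at hylt
  have hpow : (2 : Int) ^ 16 = 65536 := by norm_num
  rw [hpow] at hxlt hylt
  have hTb : 0 ≤ T ∧ T < 131072 := by omega
  -- A side
  rw [show add16 XA YA = (if ((ripple (pr XA YA 16) 0).2 = 1)
      then PySem.List.insert ((ripple (pr XA YA 16) 0).1.reverse ++ (List.replicate 16 (0:Int)).drop 16) 0 1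
      else (ripple (pr XA YA 16) 0).1.reverse ++ (List.replicate 16 (0:Int)).drop 16) by
    simp only [add16]
    rw [show (15:Int) = ((16:Nat):Int) - 1 by norm_num,
      addloop XA YA 16 (List.replicate 16 0) 0 (by simp) hx hy (Or.inl rfl)]]
  rw [ripple_spec (pr XA YA 16) 0 (Or.inl rfl)
      (by rw [pr_map_fst XA YA hx hy]; exact hxb) (by rw [pr_map_snd XA YA hx hy]; exact hyb),
    pr_map_fst XA YA hx hy, pr_map_snd XA YA hx hy]
  have hlen : (pr XA YA 16).length = 16 := by
    unfold pr; simp; omega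
  rw [hlen]
  -- B side
  rw [hs, ht, extract_loop]
  simp only [List.nil_append, List.drop_replicate, Nat.sub_self, List.replicate_zero,
    List.append_nil, add_zero, ← hT]
  have hc16 : T / 2 ^ 16 = T / 65536 := by rw [hpow]
  by_cases hcar : T ≥ 65536
  · rw [hc16, if_pos (show T / 65536 = 1 by omega), if_pos hcar,
      show lsb 17 T = lsb 16 T ++ [T / 2 ^ 16 % 2] from by
        rw [show (17 : Nat) = 16 + 1 from rfl, lsb_succ]]
    simp [PySem.List.insert_zero]
    omega
  · rw [hc16, if_neg (show ¬ T / 65536 = 1 by omega), if_neg hcar]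

lemma and_branch (XA YA : List Int) (hx : 16 ≤ XA.length) (hy : 16 ≤ YA.length) :
    (PySem.List.pyRange 0 16 1).map
      (fun i => and_chip (PySem.List.pyGetD XA i 0) (PySem.List.pyGetD YA i 0))
    = (((XA.take 16).map nb).zip ((YA.take 16).map nb)).map (fun p => p.1 * p.2) := by
  apply List.ext_getElem
  · simp [PySem.List.length_pyRange_one]; omega
  · intro i h1 h2
    have hi : i < 16 := by
      simpa [PySem.List.length_pyRange_one] using h1
    simp only [List.getElem_map, PySem.List.getElem_pyRange_one, List.getElem_zip,
      List.getElem_take]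
    rw [show (0 : Int) + i = ((i : Nat) : Int) by ring]
    simp only [PySem.List.pyGetD_natCast]
    rw [List.getD_eq_getElem?_getD, List.getElem?_eq_getElem (by omega),
      List.getD_eq_getElem?_getD, List.getElem?_eq_getElem (by omega)]
    simp [and_chip_eq]

lemma bit01_and (XA YA : List Int) :
    Bit01 ((((XA.take 16).map nb).zip ((YA.take 16).map nb)).map (fun p => p.1 * p.2)) := by
  intro v hv
  obtain ⟨⟨p, q⟩, hmem, rfl⟩ := List.mem_map.1 hv
  have hp := bit01_map_nb (XA.take 16) p (List.of_mem_zip hmem).1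
  have hq := bit01_map_nb (YA.take 16) q (List.of_mem_zip hmem).2
  rcases hp with rfl | rfl <;> rcases hq with rfl | rfl <;> simp

lemma core (XA YA : List Int) (f no : Int) (hx : 16 ≤ XA.length) (hy : 16 ≤ YA.length) :
    (if no ≠ 0 then
       (if f ≠ 0 then add16 XA YA
        else (PySem.List.pyRange 0 16 1).map
          (fun i => and_chip (PySem.List.pyGetD XA i 0) (PySem.List.pyGetD YA i 0))).map not_chip
     else
       (if f ≠ 0 then add16 XA YA
        else (PySem.List.pyRange 0 16 1).map
          (fun i => and_chip (PySem.List.pyGetD XA i 0) (PySem.List.pyGetD YA i 0))))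
    =
    (if no ≠ 0 then
       (if f ≠ 0 then
          ((List.range (if ((XA.take 16).map nb).foldl (fun s b => 2 * s + b) 0 +
                ((YA.take 16).map nb).foldl (fun t b => 2 * t + b) 0 ≥ 65536 then 17 else 16)).foldl
            (fun (st : List Int × Int) _ => (st.1 ++ [PySem.Int.mod st.2 2], PySem.Int.floordiv st.2 2))
            ([], ((XA.take 16).map nb).foldl (fun s b => 2 * s + b) 0 +
                ((YA.take 16).map nb).foldl (fun t b => 2 * t + b) 0)).1.reverse
        else (((XA.take 16).map nb).zip ((YA.take 16).map nb)).map (fun p => p.1 * p.2)).map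
          (fun b => 1 - b)
     else
       (if f ≠ 0 then
          ((List.range (if ((XA.take 16).map nb).foldl (fun s b => 2 * s + b) 0 +
                ((YA.take 16).map nb).foldl (fun t b => 2 * t + b) 0 ≥ 65536 then 17 else 16)).foldl
            (fun (st : List Int × Int) _ => (st.1 ++ [PySem.Int.mod st.2 2], PySem.Int.floordiv st.2 2))
            ([], ((XA.take 16).map nb).foldl (fun s b => 2 * s + b) 0 +
                ((YA.take 16).map nb).foldl (fun t b => 2 * t + b) 0)).1.reverse
        else (((XA.take 16).map nb).zip ((YA.take 16).map nb)).map (fun p => p.1 * p.2))) := by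
  have hbase : (if f ≠ 0 then add16 XA YA
        else (PySem.List.pyRange 0 16 1).map
          (fun i => and_chip (PySem.List.pyGetD XA i 0) (PySem.List.pyGetD YA i 0)))
      = (if f ≠ 0 then
          ((List.range (if ((XA.take 16).map nb).foldl (fun s b => 2 * s + b) 0 +
                ((YA.take 16).map nb).foldl (fun t b => 2 * t + b) 0 ≥ 65536 then 17 else 16)).foldl
            (fun (st : List Int × Int) _ => (st.1 ++ [PySem.Int.mod st.2 2], PySem.Int.floordiv st.2 2))
            ([], ((XA.take 16).map nb).foldl (fun s b => 2 * s + b) 0 +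
                ((YA.take 16).map nb).foldl (fun t b => 2 * t + b) 0)).1.reverse
        else (((XA.take 16).map nb).zip ((YA.take 16).map nb)).map (fun p => p.1 * p.2)) := by
    split
    · exact add_branch XA YA hx hy
    · exact and_branch XA YA hx hy
  have hb01 : Bit01 (if f ≠ 0 then
          ((List.range (if ((XA.take 16).map nb).foldl (fun s b => 2 * s + b) 0 +
                ((YA.take 16).map nb).foldl (fun t b => 2 * t + b) 0 ≥ 65536 then 17 else 16)).foldl
            (fun (st : List Int × Int) _ => (st.1 ++ [PySem.Int.mod st.2 2], PySem.Int.floordiv st.2 2))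
            ([], ((XA.take 16).map nb).foldl (fun s b => 2 * s + b) 0 +
                ((YA.take 16).map nb).foldl (fun t b => 2 * t + b) 0)).1.reverse
        else (((XA.take 16).map nb).zip ((YA.take 16).map nb)).map (fun p => p.1 * p.2)) := by
    split
    · rw [extract_loop]
      intro v hv
      simp only [List.nil_append] at hv
      exact bit01_lsb _ _ v (List.mem_reverse.1 hv)
    · exact bit01_and XA YA
  rw [hbase]
  split
  · exact map_not_chip_eq _ hb01
  · rfl

lemma norm_stage (x : List Int) (zx nx : Int) (hx : zx ≠ 0 ∨ 16 ≤ x.length) :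
    (if nx ≠ 0 then
        (if zx ≠ 0 then List.replicate 16 (0 : Int)
         else (PySem.List.slice x none (some 16)).map
           (fun b => if b = 1 then (1 : Int) else 0)).map (fun b => 1 - b)
      else
        (if zx ≠ 0 then List.replicate 16 (0 : Int)
         else (PySem.List.slice x none (some 16)).map
           (fun b => if b = 1 then (1 : Int) else 0)))
    = (((if nx ≠ 0 then (if zx ≠ 0 then List.replicate 16 (0 : Int) else x).map not_chip
         else (if zx ≠ 0 then List.replicate 16 (0 : Int) else x)).take 16).map nb) := by
  rw [nb_fun_eq]
  have hslice : PySem.List.slice x none (some 16) = x.take 16 :=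
    PySem.List.slice_to x (by norm_num)
  rw [hslice]
  split_ifs with hn hz hz
  · decide
  · rw [← List.map_take, List.map_map, List.map_map]
    apply List.map_congr_left
    intro b _
    simp only [Function.comp_apply, not_chip_eq]
    rcases nb01 b with h | h <;> rw [h] <;> norm_num [nb]
  · decide
  · rfl

lemma len_stage (x : List Int) (zx nx : Int) (hx : zx ≠ 0 ∨ 16 ≤ x.length) :
    16 ≤ (if nx ≠ 0 then (if zx ≠ 0 then List.replicate 16 (0 : Int) else x).map not_chip
         else (if zx ≠ 0 then List.replicate 16 (0 : Int) else x)).length := by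
  split_ifs <;> first | omega | (simp only [List.length_map, List.length_replicate]; omega)

-- ===== VERDICT (by name: the statement is the Claim_ definition above) =====
theorem ALU_spec : Claim_equal_ALU := by
  intro x y zx nx zy ny f no hdom hpre
  obtain ⟨hx, hy⟩ := hpre
  simp only [Spec_ALU, ALU, ALU_alt]
  rw [norm_stage x zx nx hx, norm_stage y zy ny hy]
  exact core _ _ f no (len_stage x zx nx hx) (len_stage y zy ny hy)
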